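-- pv_equiv track=rewrite | github.com/Aviralgupt/Nusify | utils/lyrics_processor.py | _guess_section_type
-- ===== SOURCE A (Python) =====
-- from typing import List, Dict, Tuple
--
-- def _guess_section_type(lines: List[str]) -> str:
--     """Guess the type of a section based on its characteristics"""
--     if not lines:
--         return 'verse'
--
--     # Check for chorus indicators
--     chorus_indicators = ['chorus', 'refrain', 'hook']
--     for line in lines:
--         if any(indicator in line.lower() for indicator in chorus_indicators):
--             return 'chorus'
--
--     # Check for bridge indicators
--     bridge_indicators = ['bridge', 'middle', 'break']
--     for line in lines:
--         if any(indicator in line.lower() for indicator in bridge_indicators):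
--             return 'bridge'
--
--     # Check for intro/outro
--     if len(lines) <= 2:
--         return 'intro' if len(lines) == 1 else 'verse'
--
--     # Default to verse
--     return 'verse'
-- ===== SOURCE B (Python) =====
-- from typing import List
--
-- def _guess_section_type(lines: List[str]) -> str:
--     """Guess the type of a section based on its characteristics"""
--     has_chorus = False
--     has_bridge = False
--     for line in lines:
--         low = line.lower()
--         has_chorus = has_chorus or any(ind in low for ind in ('chorus', 'refrain', 'hook'))
--         has_bridge = has_bridge or any(ind in low for ind in ('bridge', 'middle', 'break'))
--     if has_chorus:
--         return 'chorus'
--     if has_bridge: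
--         return 'bridge'
--     return 'intro' if len(lines) == 1 else 'verse'
-- ===== Notes on version B (the rewrite author's own statement) =====
-- stated objective: alternative
-- what changed: Two sequential early-return scans over the lines are replaced by one single-pass fold that maintains has_chorus/has_bridge flags, with the priority and length logic applied once after the loop.
import Mathlib
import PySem

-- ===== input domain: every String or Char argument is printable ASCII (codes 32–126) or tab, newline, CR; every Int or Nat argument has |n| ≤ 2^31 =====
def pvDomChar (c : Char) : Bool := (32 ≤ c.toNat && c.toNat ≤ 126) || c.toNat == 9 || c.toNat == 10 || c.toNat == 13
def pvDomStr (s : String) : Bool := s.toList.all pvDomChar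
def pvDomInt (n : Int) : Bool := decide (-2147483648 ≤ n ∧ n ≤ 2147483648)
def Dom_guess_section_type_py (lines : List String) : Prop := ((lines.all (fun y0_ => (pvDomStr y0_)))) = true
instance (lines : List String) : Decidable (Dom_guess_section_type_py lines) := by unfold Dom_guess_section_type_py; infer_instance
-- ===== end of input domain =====

-- B replaces A's two sequential early-return scans by one single-pass fold over the lines
-- that maintains has_chorus/has_bridge flags, applying the same priority afterwards (alternative).

-- ===== PORT A =====
def pvChorusInds : List String := ["chorus", "refrain", "hook"]
def pvBridgeInds : List String := ["bridge", "middle", "break"]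

def pvHit (inds : List String) (line : String) : Bool :=
  inds.any (fun ind => PySem.Str.isIn ind (PySem.Str.lower line))

def guess_section_type_py (lines : List String) : String :=
  if lines = [] then "verse"
  else if lines.any (fun line => pvHit pvChorusInds line) then "chorus"
  else if lines.any (fun line => pvHit pvBridgeInds line) then "bridge"
  else if lines.length ≤ 2 then (if lines.length = 1 then "intro" else "verse")
  else "verse"

-- ===== PORT B =====
def guess_section_type_py_alt (lines : List String) : String :=
  let st := lines.foldl
    (fun (st : Bool × Bool) line =>
      let low := PySem.Str.lower line
      (st.1 || pvChorusInds.any (fun ind => PySem.Str.isIn ind low),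
       st.2 || pvBridgeInds.any (fun ind => PySem.Str.isIn ind low)))
    (false, false)
  if st.1 then "chorus"
  else if st.2 then "bridge"
  else if lines.length = 1 then "intro" else "verse"

-- ===== PRECONDITION & SPEC =====
def Spec_guess_section_type_py (lines : List String) (out : String) : Prop := out = guess_section_type_py_alt lines
instance (lines : List String) (out : String) : Decidable (Spec_guess_section_type_py lines out) := by unfold Spec_guess_section_type_py; infer_instance

-- ===== CLAIM (what is proved, stated in full; the proofs are below) =====
def Claim_equal_guess_section_type_py : Prop := ∀ (lines : List String), Dom_guess_section_type_py lines → Spec_guess_section_type_py lines (guess_section_type_py lines)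

-- ===== LEMMAS AND PROOFS =====

theorem pv_fold_flags (lines : List String) (a b : Bool) :
    lines.foldl
      (fun (st : Bool × Bool) line =>
        let low := PySem.Str.lower line
        (st.1 || pvChorusInds.any (fun ind => PySem.Str.isIn ind low),
         st.2 || pvBridgeInds.any (fun ind => PySem.Str.isIn ind low)))
      (a, b)
    = (a || lines.any (fun line => pvHit pvChorusInds line),
       b || lines.any (fun line => pvHit pvBridgeInds line)) := by
  induction lines generalizing a b with
  | nil => simp
  | cons x xs ih =>
    simp only [List.foldl_cons, List.any_cons, ih]
    simp [pvHit, Bool.or_assoc]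

-- ===== VERDICT (by name: the statement is the Claim_ definition above) =====
theorem guess_section_type_py_spec : Claim_equal_guess_section_type_py := by
  intro lines _
  unfold Spec_guess_section_type_py guess_section_type_py guess_section_type_py_alt
  rw [pv_fold_flags]
  simp only [Bool.false_or]
  cases lines with
  | nil => simp
  | cons x xs =>
    simp only [if_neg (List.cons_ne_nil x xs)]
    by_cases hc : (x :: xs).any (fun line => pvHit pvChorusInds line) = true
    · simp [hc]
    · simp only [Bool.not_eq_true] at hc
      by_cases hb : (x :: xs).any (fun line => pvHit pvBridgeInds line) = true
      · simp [hc, hb]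
      · simp only [Bool.not_eq_true] at hb
        simp only [hc, hb, Bool.false_eq_true, if_false, List.length_cons]
        split_ifs with h1 h2 h3 <;> first | rfl | omega
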